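-- pv_equiv track=rewrite | github.com/fullscreen-triangle/four-sided-triangle | app/core/stages/stage4_solution/response_assembler.py | _format_as_summary
-- ===== SOURCE A (Python) =====
-- from typing import Dict, Any, List, Optional, Union
--
-- def _format_as_summary(content_sections: List[Dict[str, Any]]) -> str:
--     """Format content as a brief summary."""
--     result = []
--
--     # Add a title
--     result.append("# Summary\n")
--
--     # Extract high prominence elements from all sections
--     high_prominence_elements = []
--     for section in content_sections:
--         for element in section.get('elements', []):
--             if element.get('prominence') == 'high':
--                 high_prominence_elements.append(element)
--
--     # Add high prominence elements as bullet points
--     for element in high_prominence_elements: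
--         content = element.get('content', '')
--         if content:
--             result.append(f"* {content}")
--
--     # If we have few high prominence elements, add some medium ones
--     if len(high_prominence_elements) < 3:
--         medium_count = 0
--         for section in content_sections:
--             for element in section.get('elements', []):
--                 if element.get('prominence') == 'medium' and medium_count < 3:
--                     content = element.get('content', '')
--                     if content:
--                         result.append(f"* {content}")
--                         medium_count += 1
--
--     return "\n".join(result)
-- ===== SOURCE B (Python) =====
-- from typing import Dict, Any, List
--
--
-- def _format_as_summary(content_sections: List[Dict[str, Any]]) -> str:
--     """Format content as a brief summary (single pass over all elements)."""
--     highs, mediums = [], []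
--     for section in content_sections:
--         for element in section.get('elements', []):
--             p = element.get('prominence')
--             if p == 'high':
--                 highs.append(element)
--             elif p == 'medium' and element.get('content', ''):
--                 mediums.append(element.get('content', ''))
--     result = ["# Summary\n"]
--     result += ["* " + e.get('content', '') for e in highs if e.get('content', '')]
--     if len(highs) < 3:
--         result += ["* " + c for c in mediums[:3]]
--     return "\n".join(result)
-- ===== Notes on version B (the rewrite author's own statement) =====
-- stated objective: simpler
-- what changed: One fused pass collects the high elements and the truthy medium contents together, so the two extra section scans (bullet pass over highs and the capped medium re-scan with a counter) collapse into comprehensions and a 3-element slice.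
import Mathlib
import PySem

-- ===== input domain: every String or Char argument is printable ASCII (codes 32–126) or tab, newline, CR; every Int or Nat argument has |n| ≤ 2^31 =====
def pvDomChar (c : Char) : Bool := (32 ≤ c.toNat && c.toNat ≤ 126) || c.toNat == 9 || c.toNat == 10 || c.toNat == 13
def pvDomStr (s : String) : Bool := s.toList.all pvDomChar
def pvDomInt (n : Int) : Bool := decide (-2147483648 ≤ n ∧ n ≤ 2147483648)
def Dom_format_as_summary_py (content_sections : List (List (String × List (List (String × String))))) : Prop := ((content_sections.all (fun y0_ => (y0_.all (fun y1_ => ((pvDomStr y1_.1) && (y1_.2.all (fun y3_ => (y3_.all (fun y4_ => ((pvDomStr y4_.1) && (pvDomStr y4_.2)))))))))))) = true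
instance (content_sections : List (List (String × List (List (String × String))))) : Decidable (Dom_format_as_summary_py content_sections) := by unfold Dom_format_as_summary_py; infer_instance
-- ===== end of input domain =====

-- B fuses A's three scans into one pass collecting highs and truthy medium contents; same output, simpler.


-- ===== PORT A =====
-- section.get('elements', [])
def pvElems (sec : List (String × List (List (String × String)))) : List (List (String × String)) :=
  (PySem.Dict.mk sec).getD "elements" []
-- element.get('prominence')
def pvProm (e : List (String × String)) : Option String :=
  (PySem.Dict.mk e).get? "prominence"
-- element.get('content', '')
def pvCont (e : List (String × String)) : String :=
  (PySem.Dict.mk e).getD "content" ""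

def format_as_summary_py (content_sections : List (List (String × List (List (String × String))))) : String :=
  let result : List String := ["# Summary\n"]
  -- first double loop: collect high-prominence elements
  let high_prominence_elements : List (List (String × String)) :=
    content_sections.foldl (fun acc sec =>
      (pvElems sec).foldl (fun acc e =>
        if pvProm e = some "high" then acc ++ [e] else acc) acc) []
  -- bullet pass over the high elements
  let result := high_prominence_elements.foldl (fun r e =>
      let content := pvCont e
      if content ≠ "" then r ++ ["* " ++ content] else r) result
  -- capped medium pass
  let result :=
    if high_prominence_elements.length < 3 then
      (content_sections.foldl (fun st sec =>
        (pvElems sec).foldl (fun (st : List String × Int) e =>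
          if pvProm e = some "medium" ∧ st.2 < 3 then
            let content := pvCont e
            if content ≠ "" then (st.1 ++ ["* " ++ content], st.2 + 1) else st
          else st) st) (result, (0 : Int))).1
    else result
  PySem.Str.join "\n" result

-- ===== PORT B =====
def format_as_summary_py_alt (content_sections : List (List (String × List (List (String × String))))) : String :=
  -- single pass: highs and truthy medium contents together
  let hm : List (List (String × String)) × List String :=
    content_sections.foldl (fun st sec =>
      (pvElems sec).foldl (fun (st : List (List (String × String)) × List String) e =>
        let p := pvProm e
        if p = some "high" then (st.1 ++ [e], st.2)
        else if p = some "medium" ∧ pvCont e ≠ "" then (st.1, st.2 ++ [pvCont e])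
        else st) st) ([], [])
  let result : List String :=
    ["# Summary\n"]
    ++ hm.1.filterMap (fun e => if pvCont e ≠ "" then some ("* " ++ pvCont e) else none)
    ++ (if hm.1.length < 3 then (hm.2.take 3).map (fun c => "* " ++ c) else [])
  PySem.Str.join "\n" result

-- ===== PRECONDITION & SPEC =====
def Spec_format_as_summary_py (content_sections : List (List (String × List (List (String × String))))) (out : String) : Prop := out = format_as_summary_py_alt content_sections
instance (content_sections : List (List (String × List (List (String × String))))) (out : String) : Decidable (Spec_format_as_summary_py content_sections out) := by unfold Spec_format_as_summary_py; infer_instance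

-- ===== CLAIM (what is proved, stated in full; the proofs are below) =====
def Claim_equal_format_as_summary_py : Prop := ∀ (content_sections : List (List (String × List (List (String × String))))), Dom_format_as_summary_py content_sections → Spec_format_as_summary_py content_sections (format_as_summary_py content_sections)

-- ===== LEMMAS AND PROOFS =====

-- an element's truthy-medium content, if any (used only in the proofs)
def pvMed (e : List (String × String)) : Option String :=
  if pvProm e = some "medium" ∧ pvCont e ≠ "" then some (pvCont e) else none

-- the bullet of a high element with truthy content (proofs only)
def pvBullet (e : List (String × String)) : Option String :=
  if pvCont e ≠ "" then some ("* " ++ pvCont e) else none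

-- nested section/element loop = loop over the flattened element list
theorem pv_foldl_flat {σ : Type} (cs : List (List (String × List (List (String × String)))))
    (f : σ → List (String × String) → σ) (i : σ) :
    cs.foldl (fun acc sec => (pvElems sec).foldl f acc) i = (cs.flatMap pvElems).foldl f i := by
  induction cs generalizing i with
  | nil => rfl
  | cons h t ih => simp [List.foldl_append, ih]

-- A's high-collection loop is a filter
theorem pv_highs_eq (l : List (List (String × String))) (acc : List (List (String × String))) :
    l.foldl (fun acc e => if pvProm e = some "high" then acc ++ [e] else acc) acc
      = acc ++ l.filter (fun e => pvProm e = some "high") := by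
  induction l generalizing acc with
  | nil => simp
  | cons h t ih => by_cases hp : pvProm h = some "high" <;> simp [hp, ih]

-- A's bullet pass over the highs is a filterMap
theorem pv_bullets_eq (l : List (List (String × String))) (r : List String) :
    l.foldl (fun r e => if pvCont e ≠ "" then r ++ ["* " ++ pvCont e] else r) r
      = r ++ l.filterMap pvBullet := by
  induction l generalizing r with
  | nil => simp
  | cons h t ih =>
    by_cases hc : pvCont h = ""
    · rw [List.foldl_cons, if_neg (by simp [hc]), ih, List.filterMap_cons,
        show pvBullet h = none from by simp [pvBullet, hc]]
    · rw [List.foldl_cons, if_pos hc, ih, List.filterMap_cons,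
        show pvBullet h = some ("* " ++ pvCont h) from by simp [pvBullet, hc]]
      simp [List.append_assoc]

-- A's capped medium loop takes the first (3 - mc) truthy medium contents
theorem pv_meds_eq (l : List (List (String × String))) (r : List String) (mc : Int)
    (h0 : 0 ≤ mc) (h3 : mc ≤ 3) :
    l.foldl (fun (st : List String × Int) e =>
        if pvProm e = some "medium" ∧ st.2 < 3 then
          if pvCont e ≠ "" then (st.1 ++ ["* " ++ pvCont e], st.2 + 1) else st
        else st) (r, mc)
      = (r ++ ((l.filterMap pvMed).take (3 - mc).toNat).map (fun c => "* " ++ c),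
         mc + min (3 - mc) ((l.filterMap pvMed).length : Int)) := by
  induction l generalizing r mc with
  | nil => simp; omega
  | cons e t ih =>
    rw [List.foldl_cons]
    by_cases hm : pvProm e = some "medium" ∧ pvCont e ≠ ""
    · have hmed : pvMed e = some (pvCont e) := by simp [pvMed, hm.1, hm.2]
      by_cases hlt : mc < 3
      · rw [if_pos (show pvProm e = some "medium" ∧ ((r, mc) : List String × Int).2 < 3 from ⟨hm.1, hlt⟩),
          if_pos hm.2, ih _ _ (by omega) (by omega), List.filterMap_cons, hmed,
          show (3 - mc).toNat = ((3 - (mc + 1)).toNat) + 1 from by omega,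
          List.take_succ_cons, List.map_cons]
        simp only [Prod.mk.injEq]
        refine ⟨by simp [List.append_assoc], ?_⟩
        simp only [List.length_cons]
        push_cast
        omega
      · rw [if_neg (fun hco => hlt hco.2), ih _ _ h0 h3, List.filterMap_cons, hmed]
        have hmc : mc = 3 := by omega
        subst hmc
        simp only [Prod.mk.injEq]
        constructor
        · norm_num
        · simp only [List.length_cons]
          push_cast
          omega
    · have hmed : pvMed e = none := by
        simp only [pvMed, ite_eq_right_iff]; intro hc; exact absurd hc hm
      by_cases hp : pvProm e = some "medium"
      · have hc : ¬ pvCont e ≠ "" := fun h => hm ⟨hp, h⟩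
        by_cases hlt : mc < 3
        · rw [if_pos (show pvProm e = some "medium" ∧ ((r, mc) : List String × Int).2 < 3 from ⟨hp, hlt⟩),
            if_neg hc, ih _ _ h0 h3, List.filterMap_cons, hmed]
        · rw [if_neg (fun hco => hlt hco.2), ih _ _ h0 h3, List.filterMap_cons, hmed]
      · rw [if_neg (fun hco => hp hco.1), ih _ _ h0 h3, List.filterMap_cons, hmed]

-- B's fused loop splits into the high filter and the truthy-medium filterMap
theorem pv_fused_eq (l : List (List (String × String)))
    (hs : List (List (String × String))) (ms : List String) :
    l.foldl (fun (st : List (List (String × String)) × List String) e =>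
        let p := pvProm e
        if p = some "high" then (st.1 ++ [e], st.2)
        else if p = some "medium" ∧ pvCont e ≠ "" then (st.1, st.2 ++ [pvCont e])
        else st) (hs, ms)
      = (hs ++ l.filter (fun e => pvProm e = some "high"), ms ++ l.filterMap pvMed) := by
  induction l generalizing hs ms with
  | nil => simp
  | cons e t ih =>
    by_cases hh : pvProm e = some "high"
    · have hmed : pvMed e = none := by
        simp [pvMed, hh]
      simp [hh, ih, hmed]
    · by_cases hm : pvProm e = some "medium" ∧ pvCont e ≠ ""
      · have hmed : pvMed e = some (pvCont e) := by simp [pvMed, hm.1, hm.2]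
        simp [hm, ih, hmed]
      · have hmed : pvMed e = none := by
          simp only [pvMed, ite_eq_right_iff]; intro hc; exact absurd hc hm
        simp [hh, hm, ih, hmed]

-- ===== VERDICT (by name: the statement is the Claim_ definition above) =====
theorem format_as_summary_py_spec : Claim_equal_format_as_summary_py := by
  intro cs _
  unfold Spec_format_as_summary_py format_as_summary_py format_as_summary_py_alt
  simp only [pv_foldl_flat, pv_fused_eq, pv_highs_eq, pv_bullets_eq,
    pv_meds_eq _ _ 0 (by norm_num) (by norm_num), List.nil_append, pvBullet,
    show ((3 : Int) - 0).toNat = 3 from rfl,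
    PySem.List.foldl_append_eq_flatMap, ← List.filter_flatMap]
  by_cases h : (List.filter (fun e => pvProm e = some "high") (cs.flatMap pvElems)).length < 3
  · simp only [if_pos h, List.append_assoc]
  · simp only [if_neg h, List.append_nil]
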